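-- pv_equiv track=rewrite | github.com/mosh3eb/merlin | tests/algorithms/test_amplitude_encoding.py | _dual_rail_keys
-- ===== SOURCE A (Python) =====
-- import itertools
--
-- def _dual_rail_keys(modes: int, n_photons: int) -> set[tuple[int, ...]]:
--     states = []
--     for choices in itertools.product((0, 1), repeat=n_photons):
--         state = [0] * modes
--         for pair_idx, bit in enumerate(choices):
--             state[2 * pair_idx + bit] = 1
--         states.append(tuple(state))
--     return set(states)
-- ===== SOURCE B (Python) =====
-- def _dual_rail_keys(modes: int, n_photons: int) -> set[tuple[int, ...]]:
--     acc = []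
--
--     def go(pair_idx, state):
--         if pair_idx == n_photons:
--             acc.append(tuple(state))
--             return
--         for bit in (0, 1):
--             s = list(state)
--             s[2 * pair_idx + bit] = 1
--             go(pair_idx + 1, s)
--
--     go(0, [0] * modes)
--     return set(acc)
-- ===== Notes on version B (the rewrite author's own statement) =====
-- stated objective: alternative
-- what changed: Replaces the itertools.product enumeration of bit tuples (build each state from scratch per tuple) with a depth-first recursion that branches on the two rail choices per photon pair, extending a shared partial state pair by pair.
import Mathlib
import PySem

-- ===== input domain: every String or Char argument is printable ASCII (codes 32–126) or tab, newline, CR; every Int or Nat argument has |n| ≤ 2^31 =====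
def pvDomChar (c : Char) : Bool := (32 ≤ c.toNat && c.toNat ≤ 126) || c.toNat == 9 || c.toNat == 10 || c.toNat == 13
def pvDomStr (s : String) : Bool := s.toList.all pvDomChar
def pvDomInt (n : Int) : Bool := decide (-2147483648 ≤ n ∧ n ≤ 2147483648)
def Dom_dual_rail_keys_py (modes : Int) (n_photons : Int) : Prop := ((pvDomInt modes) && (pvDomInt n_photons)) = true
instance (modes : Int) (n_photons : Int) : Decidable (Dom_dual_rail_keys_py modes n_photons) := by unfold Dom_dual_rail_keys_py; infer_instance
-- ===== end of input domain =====

-- B replaces the itertools.product loop of A with a depth-first recursion branching on the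
-- two rail choices per photon pair (alternative decomposition, same cost).

-- ===== PORT A =====
-- itertools.product((0, 1), repeat=n): tuples in lexicographic order (last position fastest)
def pyProduct01 : Nat → List (List Int)
  | 0 => [[]]
  | n + 1 => (pyProduct01 n).flatMap (fun c => [c ++ [0], c ++ [1]])

-- for choices in product(...): state = [0]*modes; for pair_idx, bit in enumerate(choices):
--   state[2*pair_idx+bit] = 1  (pySetD: total form of the assignment; out-of-range = IndexError,
--   excluded by Pre_); states.append(tuple(state)); return set(states)
def dual_rail_keys_py (modes : Int) (n_photons : Int) : List (List Int) :=
  let states := (pyProduct01 n_photons.toNat).map (fun choices =>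
    (PySem.List.enumerate choices).foldl
      (fun state p => PySem.List.pySetD state (2 * p.1 + p.2) (1 : Int))
      (List.replicate modes.toNat (0 : Int)))
  PySem.Set.ofList states

-- ===== PORT B =====
-- def go(pair_idx, state): if pair_idx == n_photons: acc.append(tuple(state)) else for bit in
-- (0,1): s = list(state); s[2*pair_idx+bit] = 1; go(pair_idx+1, s)
-- fuel = n_photons - pair_idx (faithful for n_photons ≥ 0, i.e. inside Pre_)
def altGo : Nat → Int → List Int → List (List Int)
  | 0, _, state => [state]
  | k + 1, pair_idx, state =>
      altGo k (pair_idx + 1) (PySem.List.pySetD state (2 * pair_idx + 0) (1 : Int)) ++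
      altGo k (pair_idx + 1) (PySem.List.pySetD state (2 * pair_idx + 1) (1 : Int))

def dual_rail_keys_py_alt (modes : Int) (n_photons : Int) : List (List Int) :=
  PySem.Set.ofList (altGo n_photons.toNat 0 (List.replicate modes.toNat (0 : Int)))

-- ===== PRECONDITION & SPEC =====
-- Pre_ excludes exactly the inputs where Python A raises: n_photons < 0 (ValueError from
-- product(repeat=n_photons)) and 0 < n_photons with modes < 2*n_photons (IndexError).
def Pre_dual_rail_keys_py (modes : Int) (n_photons : Int) : Prop :=
  0 ≤ n_photons ∧ (n_photons = 0 ∨ 2 * n_photons ≤ modes)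
instance (modes : Int) (n_photons : Int) : Decidable (Pre_dual_rail_keys_py modes n_photons) := by
  unfold Pre_dual_rail_keys_py; infer_instance

def pvWitness_dual_rail_keys_py : Int × Int := (4, 2)

def Spec_dual_rail_keys_py (modes : Int) (n_photons : Int) (out : List (List Int)) : Prop := out = dual_rail_keys_py_alt modes n_photons
instance (modes : Int) (n_photons : Int) (out : List (List Int)) : Decidable (Spec_dual_rail_keys_py modes n_photons out) := by unfold Spec_dual_rail_keys_py; infer_instance

-- ===== CLAIM (what is proved, stated in full; the proofs are below) =====
def Claim_equal_dual_rail_keys_py : Prop := ∀ (modes : Int) (n_photons : Int), Dom_dual_rail_keys_py modes n_photons → Pre_dual_rail_keys_py modes n_photons → Spec_dual_rail_keys_py modes n_photons (dual_rail_keys_py modes n_photons)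

-- ===== LEMMAS AND PROOFS =====

-- the choices given by extending at the LAST position equal those by branching on the FIRST
theorem pyProduct01_succ_left (k : Nat) :
    pyProduct01 (k + 1)
      = (pyProduct01 k).map (fun c => (0 : Int) :: c)
        ++ (pyProduct01 k).map (fun c => (1 : Int) :: c) := by
  induction k with
  | zero => rfl
  | succ k ih =>
      show (pyProduct01 (k + 1)).flatMap _ = _
      conv_lhs => rw [ih]
      rw [List.flatMap_append]
      congr 1 <;>
      · show _ = ((pyProduct01 k).flatMap _).map _
        rw [List.map_flatMap, List.flatMap_map]
        simp

theorem altGo_eq_map (k : Nat) (pi : Int) (st : List Int) :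
    altGo k pi st
      = (pyProduct01 k).map (fun c =>
          (PySem.List.enumerate c pi).foldl
            (fun state p => PySem.List.pySetD state (2 * p.1 + p.2) (1 : Int)) st) := by
  induction k generalizing pi st with
  | zero => simp [altGo, pyProduct01, PySem.List.enumerate_nil]
  | succ k ih =>
      rw [pyProduct01_succ_left]
      simp only [altGo, ih, List.map_append, List.map_map]
      congr 1

-- ===== VERDICT (by name: the statement is the Claim_ definition above) =====
theorem dual_rail_keys_py_spec : Claim_equal_dual_rail_keys_py := by
  intro modes n_photons _ _
  unfold Spec_dual_rail_keys_py dual_rail_keys_py dual_rail_keys_py_alt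
  rw [altGo_eq_map]
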